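-- pv_equiv track=rewrite | github.com/Vict0r-David/UNIPG | Proba_Arg/Old_files/Old_DATA/Old_test/FastLab.py | path_att_def
-- ===== SOURCE A (Python) =====
-- def get_paths(node, end, ldico_att_out, dico_att, paths=None, current_path=None):
--     if paths is None:
--         paths = []
--     if current_path is None:
--         current_path = []
--
--     current_path.append(node)
--     if node not in ldico_att_out or node == end:
--         paths.append(current_path)
--     else:
--         children = []
--         for att in ldico_att_out[node]:
--             children.append(dico_att[att][1])
--         for child in children:
--             get_paths(child, end, ldico_att_out, dico_att, paths, list(current_path))
--     return paths
--
-- def arg_to_att(path):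
--     output = []
--     for i in range(len(path)):
--         if i+1 < len(path):
--             att = path[i] + '->' + path[i+1]
--             output.append(att)
--     return output
--
-- def good_paths(node, end, ldico_att_out, dico_att):
--     all = get_paths(node, end, ldico_att_out, dico_att)
--     paths = []
--     for path in all:
--         if path[-1] == end:
--             p = arg_to_att(path)
--             paths.append(p)
--     return paths
--
-- def path_att_def(node, end, ldico_att_out, dico_att):
--     paths = good_paths(node, end, ldico_att_out, dico_att)
--     l_att = []
--     l_def = []
--     for path in paths:
--         if len(path)%2 == 1:
--             l_att.append(path)
--         else:
--             l_def.append(path)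
--     return l_att,l_def
-- ===== SOURCE B (Python) =====
-- def path_att_def(node, end, ldico_att_out, dico_att):
--     l_att, l_def = [], []
--
--     def walk(n, edges):
--         if n not in ldico_att_out or n == end:
--             if n == end:
--                 (l_att if len(edges) % 2 == 1 else l_def).append(edges)
--             return
--         for att in ldico_att_out[n]:
--             c = dico_att[att][1]
--             walk(c, edges + [n + '->' + c])
--
--     walk(node, [])
--     return l_att, l_def
-- ===== Notes on version B (the rewrite author's own statement) =====
-- stated objective: simpler
-- what changed: A's four-stage pipeline (enumerate all node-paths, filter by endpoint, rebuild edge strings with arg_to_att, partition by parity) is fused into one recursive walk that carries the growing edge-string list and appends it to l_att/l_def directly at end-leaves, never materialising the intermediate node-path lists or making the two post-passes.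
import Mathlib
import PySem

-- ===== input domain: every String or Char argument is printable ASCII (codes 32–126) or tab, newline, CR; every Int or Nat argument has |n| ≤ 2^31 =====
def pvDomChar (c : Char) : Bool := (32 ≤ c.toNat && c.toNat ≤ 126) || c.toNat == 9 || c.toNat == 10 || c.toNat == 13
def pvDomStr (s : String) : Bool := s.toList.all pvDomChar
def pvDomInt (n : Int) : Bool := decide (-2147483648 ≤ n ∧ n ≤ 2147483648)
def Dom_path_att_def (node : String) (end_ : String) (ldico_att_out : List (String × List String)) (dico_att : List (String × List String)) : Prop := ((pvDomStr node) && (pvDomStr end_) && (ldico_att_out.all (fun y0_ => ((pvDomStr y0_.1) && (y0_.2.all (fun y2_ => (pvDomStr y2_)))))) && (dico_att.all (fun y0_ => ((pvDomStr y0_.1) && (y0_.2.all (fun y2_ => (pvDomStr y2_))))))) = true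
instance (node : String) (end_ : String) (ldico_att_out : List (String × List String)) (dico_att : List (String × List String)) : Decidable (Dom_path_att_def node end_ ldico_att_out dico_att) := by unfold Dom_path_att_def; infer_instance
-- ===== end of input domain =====

-- B fuses A's four passes (path enumeration, endpoint filter, arg_to_att rebuild, parity partition)
-- into one recursive walk carrying the edge-string list; equivalence of the RETURN values is proved.

-- ===== PORT A =====
-- get_paths: the recursion is not structurally terminating on cyclic graphs (where the Python
-- diverges with RecursionError, excluded by Pre_), so it takes a fuel argument bounding the
-- recursion depth; the top-level call passes ldico_att_out.length + 1, which on acyclic graphs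
-- (Pre_) is never exhausted, since a path repeats no expanded key.
def pvGetPaths (ldico_att_out dico_att : List (String × List String)) (end_ : String) :
    Nat → String → List (List String) → List String → List (List String)
  | 0, _, paths, _ => paths
  | fuel + 1, node, paths, current_path =>
    let cp := current_path ++ [node]
    if !(PySem.Dict.mk ldico_att_out).contains node || node == end_ then
      paths ++ [cp]
    else
      -- 'ldico_att_out[node]' is present here (contains is true); 'dico_att[att][1]' raises
      -- KeyError / IndexError where the Option is none — those inputs are outside Pre_.
      let atts := ((PySem.Dict.mk ldico_att_out).get? node).getD []
      let children := atts.foldl (fun cs att =>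
        cs ++ [(PySem.List.pyGet? (((PySem.Dict.mk dico_att).get? att).getD []) 1).getD ""]) []
      children.foldl (fun ps child => pvGetPaths ldico_att_out dico_att end_ fuel child ps cp) paths

def pvArgToAtt (path : List String) : List String :=
  (List.range path.length).foldl (fun output i =>
    if i + 1 < path.length then
      output ++ [path.getD i "" ++ "->" ++ path.getD (i + 1) ""]  -- indices in range: getD is exact
    else output) []

def pvGoodPaths (node end_ : String) (ldico_att_out dico_att : List (String × List String)) :
    List (List String) :=
  let all := pvGetPaths ldico_att_out dico_att end_ (ldico_att_out.length + 1) node [] []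
  all.foldl (fun paths path =>
    if PySem.List.pyGet? path (-1) == some end_ then paths ++ [pvArgToAtt path] else paths) []

def path_att_def (node : String) (end_ : String) (ldico_att_out : List (String × List String)) (dico_att : List (String × List String)) : List (List String) × List (List String) :=
  let paths := pvGoodPaths node end_ ldico_att_out dico_att
  paths.foldl (fun acc path =>
    if path.length % 2 == 1 then (acc.1 ++ [path], acc.2) else (acc.1, acc.2 ++ [path])) ([], [])

-- ===== PORT B =====
-- c = dico_att[att][1]  (none = KeyError/IndexError, outside Pre_)
def pvChild (dico_att : List (String × List String)) (att : String) : String :=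
  (PySem.List.pyGet? (((PySem.Dict.mk dico_att).get? att).getD []) 1).getD ""

-- (l_att if len(edges) % 2 == 1 else l_def).append(edges)
def pvPush (edges : List String) (acc : List (List String) × List (List String)) :
    List (List String) × List (List String) :=
  if edges.length % 2 == 1 then (acc.1 ++ [edges], acc.2) else (acc.1, acc.2 ++ [edges])

-- walk: same fuel discipline as the A-side recursion (the Python B recursion diverges on the
-- same cyclic inputs, which Pre_ excludes).
def pvWalk (ldico_att_out dico_att : List (String × List String)) (end_ : String) :
    Nat → String → List String → List (List String) × List (List String) →
    List (List String) × List (List String)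
  | 0, _, _, acc => acc
  | fuel + 1, n, edges, acc =>
    match (PySem.Dict.mk ldico_att_out).get? n with
    | none => if n == end_ then pvPush edges acc else acc
    | some atts =>
      if n == end_ then pvPush edges acc
      else atts.foldl (fun a att =>
        pvWalk ldico_att_out dico_att end_ fuel (pvChild dico_att att)
          (edges ++ [n ++ "->" ++ pvChild dico_att att]) a) acc

def path_att_def_alt (node : String) (end_ : String) (ldico_att_out : List (String × List String)) (dico_att : List (String × List String)) : List (List String) × List (List String) :=
  pvWalk ldico_att_out dico_att end_ (ldico_att_out.length + 1) node [] ([], [])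

-- ===== PRECONDITION & SPEC =====
-- attack id resolves: dico_att has it and the value list has index 1
def pvWfAtt (dico_att : List (String × List String)) (att : String) : Bool :=
  match (PySem.Dict.mk dico_att).get? att with
  | some v => decide (2 ≤ v.length)
  | none => false

-- successors of a node in the step relation get_paths follows (end_ is never expanded)
def pvSuccs (ldico_att_out dico_att : List (String × List String)) (end_ : String) (n : String) :
    List String :=
  if n == end_ then []
  else (((PySem.Dict.mk ldico_att_out).get? n).getD []).map (pvChild dico_att)

def pvStepSet (ldico_att_out dico_att : List (String × List String)) (end_ : String)
    (s : List String) : List String :=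
  (s ++ s.flatMap (pvSuccs ldico_att_out dico_att end_)).dedup

-- all nodes reachable from the start node (the iteration count suffices: shortest distances are
-- bounded by the number of keys of ldico_att_out)
def pvReachFrom (ldico_att_out dico_att : List (String × List String)) (end_ node : String) :
    List String :=
  (pvStepSet ldico_att_out dico_att end_)^[ldico_att_out.length + 1] [node]

-- all nodes reachable from n in ≥ 1 step (any cycle through n is at most that long)
def pvReach (ldico_att_out dico_att : List (String × List String)) (end_ n : String) :
    List String :=
  (pvStepSet ldico_att_out dico_att end_)^[ldico_att_out.length + 1]
    (pvSuccs ldico_att_out dico_att end_ n)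

-- Pre_ excludes exactly the inputs on which the Python A raises: some node the traversal reaches
-- carries an attack id that does not resolve in dico_att (KeyError, or IndexError on a value
-- shorter than 2), or the traversal can run around a cycle of the attack graph (RecursionError).
def Pre_path_att_def (node : String) (end_ : String) (ldico_att_out : List (String × List String)) (dico_att : List (String × List String)) : Prop :=
  (∀ n ∈ pvReachFrom ldico_att_out dico_att end_ node, n ≠ end_ →
    ∀ att ∈ ((PySem.Dict.mk ldico_att_out).get? n).getD [], pvWfAtt dico_att att = true) ∧
  (∀ n ∈ pvReachFrom ldico_att_out dico_att end_ node,
    n ∉ pvReach ldico_att_out dico_att end_ n)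
instance (node : String) (end_ : String) (ldico_att_out : List (String × List String)) (dico_att : List (String × List String)) : Decidable (Pre_path_att_def node end_ ldico_att_out dico_att) := by unfold Pre_path_att_def; infer_instance

def pvWitness_path_att_def : String × String × (List (String × List String)) × (List (String × List String)) :=
  ("a", "c", [("a", ["x"]), ("b", ["y"])], [("x", ["a", "b"]), ("y", ["b", "c"])])

def Spec_path_att_def (node : String) (end_ : String) (ldico_att_out : List (String × List String)) (dico_att : List (String × List String)) (out : List (List String) × List (List String)) : Prop := out = path_att_def_alt node end_ ldico_att_out dico_att
instance (node : String) (end_ : String) (ldico_att_out : List (String × List String)) (dico_att : List (String × List String)) (out : List (List String) × List (List String)) : Decidable (Spec_path_att_def node end_ ldico_att_out dico_att out) := by unfold Spec_path_att_def; infer_instance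

-- ===== CLAIM (what is proved, stated in full; the proofs are below) =====
def Claim_equal_path_att_def : Prop := ∀ (node : String) (end_ : String) (ldico_att_out : List (String × List String)) (dico_att : List (String × List String)), Dom_path_att_def node end_ ldico_att_out dico_att → Pre_path_att_def node end_ ldico_att_out dico_att → Spec_path_att_def node end_ ldico_att_out dico_att (path_att_def node end_ ldico_att_out dico_att)

-- ===== LEMMAS AND PROOFS =====

-- edge list of a node path, structurally (what arg_to_att computes)
def pvEdges : List String → List String
  | [] => []
  | [_] => []
  | a :: b :: t => (a ++ "->" ++ b) :: pvEdges (b :: t)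

-- A's filter+rebuild+partition pipeline as ONE fold (the fused form both sides are reduced to)
def pvProcAll (end_ : String) (acc : List (List String) × List (List String))
    (ps : List (List String)) : List (List String) × List (List String) :=
  ps.foldl (fun ac p =>
    if PySem.List.pyGet? p (-1) == some end_ then pvPush (pvArgToAtt p) ac else ac) acc

theorem pv_foldl_seed {α β : Type} (F : List β → α → List β)
    (h : ∀ ps c, F ps c = ps ++ F [] c) :
    ∀ (l : List α) (ps : List β), l.foldl F ps = ps ++ l.foldl F [] := by
  intro l
  induction l with
  | nil => simp
  | cons c t ih =>
    intro ps
    simp only [List.foldl_cons]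
    rw [h ps c, ih (ps ++ F [] c), ih (F [] c)]
    simp

theorem pvGetPaths_acc (ldo da : List (String × List String)) (end_ : String) :
    ∀ (fuel : Nat) (node : String) (paths : List (List String)) (cp : List String),
      pvGetPaths ldo da end_ fuel node paths cp =
        paths ++ pvGetPaths ldo da end_ fuel node [] cp := by
  intro fuel
  induction fuel with
  | zero => intro node paths cp; simp [pvGetPaths]
  | succ fuel ih =>
    intro node paths cp
    simp only [pvGetPaths]
    split
    · simp
    · rw [pv_foldl_seed _ (fun ps c => ih c ps _)]

theorem pvEdges_snoc (l : List String) (b c : String) :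
    pvEdges (l ++ [b, c]) = pvEdges (l ++ [b]) ++ [b ++ "->" ++ c] := by
  induction l with
  | nil => rfl
  | cons a l ih =>
    cases l with
    | nil => rfl
    | cons a' l' =>
      simp only [List.cons_append] at ih
      simp only [List.cons_append, pvEdges]
      rw [ih]

theorem pvArgToAtt_map (l : List String) :
    pvArgToAtt l = (List.range (l.length - 1)).map
      (fun i => l.getD i "" ++ "->" ++ l.getD (i + 1) "") := by
  cases l with
  | nil => rfl
  | cons a t =>
    simp only [pvArgToAtt, List.length_cons, Nat.add_sub_cancel]
    rw [List.range_succ, List.foldl_append]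
    simp only [List.foldl_cons, List.foldl_nil]
    rw [if_neg (by omega)]
    rw [PySem.List.foldl_congr_mem _ _ (fun output i =>
      output ++ [(a :: t).getD i "" ++ "->" ++ (a :: t).getD (i + 1) ""]) _
      (by intro acc x hx; rw [if_pos (by simpa using (List.mem_range.mp hx))])]
    simpa using PySem.List.foldl_append_singleton_eq_map
      (fun i => (a :: t).getD i "" ++ "->" ++ (a :: t).getD (i + 1) "") (List.range t.length) []

theorem pvArgToAtt_eq_pvEdges (l : List String) : pvArgToAtt l = pvEdges l := by
  induction l with
  | nil => rfl
  | cons a t ih =>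
    cases t with
    | nil => rfl
    | cons b t' =>
      rw [pvArgToAtt_map] at ih ⊢
      simp only [List.length_cons, Nat.add_sub_cancel] at ih ⊢
      rw [List.range_succ_eq_map, List.map_cons, List.map_map]
      show _ = (a ++ "->" ++ b) :: pvEdges (b :: t')
      rw [← ih]
      simp [Function.comp_def]

theorem pvProcAll_append (end_ : String) (acc : List (List String) × List (List String))
    (xs ys : List (List String)) :
    pvProcAll end_ acc (xs ++ ys) = pvProcAll end_ (pvProcAll end_ acc xs) ys := by
  simp [pvProcAll, List.foldl_append]

theorem pv_fuse (end_ : String) :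
    ∀ (all : List (List String)) (ps0 : List (List String))
      (acc : List (List String) × List (List String)),
      ((all.foldl (fun paths p =>
          if PySem.List.pyGet? p (-1) == some end_ then paths ++ [pvArgToAtt p] else paths) ps0).foldl
        (fun ac p => if p.length % 2 == 1 then (ac.1 ++ [p], ac.2) else (ac.1, ac.2 ++ [p])) acc)
      = pvProcAll end_ (ps0.foldl
          (fun ac p => if p.length % 2 == 1 then (ac.1 ++ [p], ac.2) else (ac.1, ac.2 ++ [p])) acc) all := by
  intro all
  induction all with
  | nil => intro ps0 acc; simp [pvProcAll]
  | cons p t ih =>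
    intro ps0 acc
    simp only [List.foldl_cons, pvProcAll]
    cases hc : (PySem.List.pyGet? p (-1) == some end_)
    · simp only [Bool.false_eq_true, if_false]
      rw [ih]; rfl
    · simp only [if_true]
      rw [ih]
      simp [pvProcAll, pvPush, List.foldl_append]

theorem pv_main (ldo da : List (String × List String)) (end_ : String) :
    ∀ (fuel : Nat) (node : String) (cp : List String)
      (acc : List (List String) × List (List String)),
      pvWalk ldo da end_ fuel node (pvEdges (cp ++ [node])) acc =
        pvProcAll end_ acc (pvGetPaths ldo da end_ fuel node [] cp) := by
  intro fuel
  induction fuel with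
  | zero => intro node cp acc; simp [pvWalk, pvGetPaths, pvProcAll]
  | succ fuel ih =>
    intro node cp acc
    simp only [pvWalk, pvGetPaths]
    cases hg : (PySem.Dict.mk ldo).get? node with
    | none =>
      have hc : (PySem.Dict.mk ldo).contains node = false := by
        rw [PySem.Dict.contains_eq_isSome_get?, hg]; rfl
      simp only [hc, Bool.not_false, Bool.true_or, if_true]
      simp [pvProcAll, PySem.List.pyGet?_neg_one_append_singleton,
        pvArgToAtt_eq_pvEdges]
    | some atts =>
      have hc : (PySem.Dict.mk ldo).contains node = true := by
        rw [PySem.Dict.contains_eq_isSome_get?, hg]; rfl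
      cases he : (node == end_) with
      | true =>
        have heq : node = end_ := by simpa using he
        subst heq
        simp [pvProcAll, PySem.List.pyGet?_neg_one_append_singleton,
          pvArgToAtt_eq_pvEdges]
      | false =>
        simp only [hc, Bool.not_true, Bool.false_or, Bool.false_eq_true, if_false,
          Option.getD_some]
        have hm : (List.foldl (fun cs att =>
            cs ++ [(PySem.List.pyGet? (((PySem.Dict.mk da).get? att).getD []) 1).getD ""]) [] atts)
            = atts.map (pvChild da) := by
          simpa using PySem.List.foldl_append_singleton_eq_map (pvChild da) atts []
        rw [hm]
        clear hm hg hc he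
        induction atts generalizing acc with
        | nil => simp [pvProcAll]
        | cons att t iht =>
          simp only [List.map_cons, List.foldl_cons]
          rw [pv_foldl_seed _ (fun ps c => pvGetPaths_acc ldo da end_ fuel c ps _) _
              (pvGetPaths ldo da end_ fuel (pvChild da att) [] (cp ++ [node]))]
          rw [pvProcAll_append]
          have hed : pvEdges (cp ++ [node]) ++ [node ++ "->" ++ pvChild da att]
              = pvEdges ((cp ++ [node]) ++ [pvChild da att]) := by
            rw [List.append_assoc]
            exact (pvEdges_snoc cp node (pvChild da att)).symm
          rw [hed, ih (pvChild da att) (cp ++ [node]) acc]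
          exact iht (pvProcAll end_ acc (pvGetPaths ldo da end_ fuel (pvChild da att) [] (cp ++ [node])))

-- ===== VERDICT (by name: the statement is the Claim_ definition above) =====
theorem path_att_def_spec : Claim_equal_path_att_def := by
  intro node end_ ldo da _ _
  unfold Spec_path_att_def path_att_def pvGoodPaths path_att_def_alt
  rw [pv_fuse]
  simpa [pvProcAll] using (pv_main ldo da end_ (ldo.length + 1) node [] ([], [])).symm
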